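-- pv_equiv track=rewrite | github.com/micahyoung324/Advent-Of-Code-Archive | 2025/02/main.py | is_valid2
-- ===== SOURCE A (Python) =====
-- def is_valid2(num: int) -> bool:
--     num_str = str(num)
--
--     if len(num_str) == 1:
--         return True
--
--     if len(num_str) == 2:
--         return num_str[0] != num_str[1]
--
--     if len(set(num_str)) == 1:
--         return False
--
--     for len_i in range(2, (len(num_str) + 1) // 2 + 1):
--         if len(num_str) % len_i == 0:
--             base_str = num_str[:len_i]
--             for i in range(1, (len(num_str) // len_i)):
--                 if base_str == num_str[len_i * i : len_i * (i + 1)]: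
--                     continue
--                 break
--             else:
--                 return False
--
--     return True
-- ===== SOURCE B (Python) =====
-- def is_valid2(num: int) -> bool:
--     s = str(num)
--     n = len(s)
--     return not any(n % d == 0 and s[d:] == s[:-d] for d in range(1, n))
-- ===== Notes on version B (the rewrite author's own statement) =====
-- stated objective: simpler
-- what changed: Replaces A's three special-case guards plus nested block-comparison loops by a single comprehension over all proper divisors d, detecting period d with one shift-overlap comparison s[d:] == s[:-d] instead of comparing every length-d block to the first.
import Mathlib
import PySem

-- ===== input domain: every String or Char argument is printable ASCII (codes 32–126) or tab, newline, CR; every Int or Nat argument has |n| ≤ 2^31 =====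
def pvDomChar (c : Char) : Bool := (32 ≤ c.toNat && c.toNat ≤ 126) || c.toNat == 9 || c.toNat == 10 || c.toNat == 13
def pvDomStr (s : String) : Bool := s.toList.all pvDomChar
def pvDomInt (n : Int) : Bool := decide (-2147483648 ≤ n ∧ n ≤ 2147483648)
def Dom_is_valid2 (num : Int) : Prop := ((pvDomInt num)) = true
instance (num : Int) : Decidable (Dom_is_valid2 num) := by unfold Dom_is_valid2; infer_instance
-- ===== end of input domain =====

-- B replaces A's special-case guards and nested block loops by one scan over proper divisors
-- with a single shift-overlap comparison per divisor (objective: simpler; no speed claim).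

-- ===== PORT A =====
def is_valid2 (num : Int) : Bool :=
  let s := PySem.Int.toChars num
  let n : Int := s.length
  if n == 1 then true
  else if n == 2 then decide (PySem.List.pyGet? s 0 ≠ PySem.List.pyGet? s 1)
  else if (PySem.Set.ofList s).length == 1 then false
  else if (PySem.List.pyRange 2 (PySem.Int.floordiv (n + 1) 2 + 1) 1).any (fun d =>
        PySem.Int.mod n d == 0 &&
        (PySem.List.pyRange 1 (PySem.Int.floordiv n d) 1).all (fun i =>
          PySem.List.slice s (some 0) (some d) ==
          PySem.List.slice s (some (d * i)) (some (d * (i + 1)))))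
    then false
  else true

-- ===== PORT B =====
def is_valid2_alt (num : Int) : Bool :=
  let s := PySem.Int.toChars num
  let n : Int := s.length
  !((PySem.List.pyRange 1 n 1).any (fun d =>
      PySem.Int.mod n d == 0 &&
      PySem.List.slice s (some d) none == PySem.List.slice s none (some (-d))))

-- ===== PRECONDITION & SPEC =====
def Spec_is_valid2 (num : Int) (out : Bool) : Prop := out = is_valid2_alt num
instance (num : Int) (out : Bool) : Decidable (Spec_is_valid2 num out) := by unfold Spec_is_valid2; infer_instance

-- ===== CLAIM (what is proved, stated in full; the proofs are below) =====
def Claim_equal_is_valid2 : Prop := ∀ (num : Int), Dom_is_valid2 num → Spec_is_valid2 num (is_valid2 num)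

-- ===== LEMMAS AND PROOFS =====

-- The two port bodies, as functions of the character list (cited by `rfl` from the ports).
def aCore (s : List Char) : Bool :=
  let n : Int := s.length
  if n == 1 then true
  else if n == 2 then decide (PySem.List.pyGet? s 0 ≠ PySem.List.pyGet? s 1)
  else if (PySem.Set.ofList s).length == 1 then false
  else if (PySem.List.pyRange 2 (PySem.Int.floordiv (n + 1) 2 + 1) 1).any (fun d =>
        PySem.Int.mod n d == 0 &&
        (PySem.List.pyRange 1 (PySem.Int.floordiv n d) 1).all (fun i =>
          PySem.List.slice s (some 0) (some d) ==
          PySem.List.slice s (some (d * i)) (some (d * (i + 1)))))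
    then false
  else true

def bCore (s : List Char) : Bool :=
  let n : Int := s.length
  !((PySem.List.pyRange 1 n 1).any (fun d =>
      PySem.Int.mod n d == 0 &&
      PySem.List.slice s (some d) none == PySem.List.slice s none (some (-d))))

-- "s has period k", stated on indices.
def Periodic (s : List Char) (k : Nat) : Prop :=
  ∀ j (h : j + k < s.length), s[j + k]'h = s[j]'(by omega)

lemma drop_eq_take_iff (s : List Char) (k : Nat) (hk : k ≤ s.length) :
    s.drop k = s.take (s.length - k) ↔ Periodic s k := by
  constructor
  · intro h j hj
    have h1 : (s.drop k)[j]'(by simp; omega) = (s.take (s.length - k))[j]'(by simp; omega) := by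
      simp only [h]
    simpa [List.getElem_drop, List.getElem_take, Nat.add_comm] using h1
  · intro hp
    apply List.ext_getElem
    · simp
    · intro j h1 h2
      simp only [List.getElem_drop, List.getElem_take]
      have := hp j (by simp at h1; omega)
      simpa [Nat.add_comm] using this

lemma getElem_mod_of_periodic (s : List Char) (k : Nat) (hk : 0 < k)
    (hp : Periodic s k) : ∀ j (h : j < s.length), s[j]'h = s[j % k]'(by
      have := Nat.mod_le j k; omega) := by
  intro j
  induction j using Nat.strong_induction_on with
  | _ j ih =>
    intro h
    by_cases hj : j < k
    · simp [Nat.mod_eq_of_lt hj]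
    · rw [Nat.not_lt] at hj
      have e : j = (j - k) + k := by omega
      have h2 : (j - k) + k < s.length := by omega
      calc s[j]'h = s[(j - k) + k]'(by omega) := by simp only [← e]
        _ = s[j - k]'(by omega) := hp (j - k) h2
        _ = s[(j - k) % k]'_ := ih (j - k) (by omega) (by omega)
        _ = s[j % k]'_ := by congr 1; conv_rhs => rw [e]; rw [Nat.add_mod_right]

lemma block_eq_iff (s : List Char) (k i : Nat) (hle : k * (i + 1) ≤ s.length) :
    (s.drop (k * i)).take k = s.take k ↔
      ∀ j (hj : j < k), s[k * i + j]'(by have h : k*(i+1) = k*i+k := Nat.mul_succ k i; omega) =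
        s[j]'(by have h : k*(i+1) = k*i+k := Nat.mul_succ k i; omega) := by
  have hms : k*(i+1) = k*i+k := Nat.mul_succ k i
  constructor
  · intro h j hj
    have h1 : ((s.drop (k * i)).take k)[j]'(by simp; omega) =
        (s.take k)[j]'(by simp; omega) := by simp only [h]
    simpa [List.getElem_take, List.getElem_drop] using h1
  · intro hp
    apply List.ext_getElem
    · simp; omega
    · intro j h1 h2
      simp only [List.getElem_take, List.getElem_drop]
      have hj : j < k := by simp at h1; omega
      exact hp j hj

lemma period_iff_blocks (s : List Char) (k : Nat) (hk : 1 ≤ k)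
    (hdvd : k ∣ s.length) (hlt : k < s.length) :
    Periodic s k ↔ ∀ i, 1 ≤ i → i < s.length / k →
      (s.drop (k * i)).take k = s.take k := by
  obtain ⟨m, hm⟩ := hdvd
  have hm2 : 2 ≤ m := by nlinarith [Nat.lt_irrefl (k*1)]
  have hdivm : s.length / k = m := by rw [hm, Nat.mul_div_cancel_left _ (by omega)]
  rw [hdivm]
  constructor
  · intro hp i hi1 hi2
    have hle : k * (i + 1) ≤ s.length := by
      rw [hm]; exact Nat.mul_le_mul_left k hi2
    rw [block_eq_iff s k i hle]
    intro j hj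
    have hms : k*(i+1) = k*i+k := Nat.mul_succ k i
    have hmod := getElem_mod_of_periodic s k (by omega) hp
    rw [hmod (k * i + j) (by omega), hmod j (by omega)]
    exact getElem_congr rfl (by rw [Nat.mul_add_mod]) _
  · intro hb j hj
    obtain ⟨q, r, hrk, hjd⟩ : ∃ q r, r < k ∧ k * q + r = j :=
      ⟨j / k, j % k, Nat.mod_lt _ (by omega), Nat.div_add_mod j k⟩
    have hq1 : q + 1 < m := by
      have h1 : k * (q + 1) < k * m := by
        have h : k * (q + 1) = k * q + k := Nat.mul_succ k q
        omega
      exact Nat.lt_of_mul_lt_mul_left h1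
    have hbase : ∀ p (hp1 : 1 ≤ p) (hp2 : p < m) j' (hj' : j' < k),
        s[k * p + j']'(by
          have h1 : k * (p + 1) ≤ k * m := Nat.mul_le_mul_left k (by omega)
          have h2 : k * (p + 1) = k * p + k := Nat.mul_succ k p
          omega) =
        s[j']'(by omega) := by
      intro p hp1 hp2 j' hj'
      have hle : k * (p + 1) ≤ s.length := by
        rw [hm]; exact Nat.mul_le_mul_left k hp2
      exact (block_eq_iff s k p hle).mp (hb p hp1 hp2) j' hj'
    have hrlen : r < s.length := by omega
    have hjlen : j < s.length := by omega
    have hs2 : s[j + k]'hj = s[r]'hrlen := by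
      have e2 : j + k = k * (q + 1) + r := by
        have h : k * (q + 1) = k * q + k := Nat.mul_succ k q
        omega
      exact (getElem_congr rfl e2 _).trans (hbase (q + 1) (by omega) hq1 r hrk)
    have hs1 : s[j]'hjlen = s[r]'hrlen := by
      by_cases hq0 : q = 0
      · have h0 : k * q = 0 := by rw [hq0]; ring
        exact getElem_congr rfl (by omega) _
      · exact (getElem_congr rfl hjd.symm _).trans (hbase q (by omega) (by omega) r hrk)
    rw [hs2, hs1]

lemma setcheck_iff (s : List Char) (hne : s ≠ []) :
    (PySem.Set.ofList s).length = 1 ↔ Periodic s 1 := by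
  have h0 : 0 < s.length := List.length_pos_iff.mpr hne
  constructor
  · intro h
    obtain ⟨c, hc⟩ := List.length_eq_one_iff.mp h
    have hmem : ∀ x ∈ s, x = c := by
      intro x hx
      have hx2 : x ∈ PySem.Set.ofList s := (PySem.Set.mem_ofList _ _).mpr hx
      rw [hc] at hx2
      simpa using hx2
    intro j hj
    rw [hmem _ (List.getElem_mem _), hmem _ (List.getElem_mem _)]
  · intro hp
    have hall : ∀ j (h : j < s.length), s[j] = s[0]'h0 := by
      intro j h
      have := getElem_mod_of_periodic s 1 (by omega) hp j h
      rw [this]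
      exact getElem_congr rfl (by omega) _
    have hmem : ∀ x ∈ PySem.Set.ofList s, x = s[0]'h0 := by
      intro x hx
      obtain ⟨j, h, he⟩ := List.mem_iff_getElem.mp ((PySem.Set.mem_ofList _ _).mp hx)
      rw [← he]; exact hall j h
    have hin : s[0]'h0 ∈ PySem.Set.ofList s := (PySem.Set.mem_ofList _ _).mpr (List.getElem_mem _)
    have hnd : (PySem.Set.ofList s).Nodup := PySem.Set.nodup_ofList s
    match hl : PySem.Set.ofList s, hin, hmem, hnd with
    | [], hin, _, _ => exact absurd hin (by simp)
    | [a], _, _, _ => rfl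
    | a :: b :: t, _, hmem, hnd => 
      have ha : a = s[0]'h0 := hmem a (by simp)
      have hb : b = s[0]'h0 := hmem b (by simp)
      rw [List.nodup_cons] at hnd
      exact absurd (by simp [ha, hb.symm] : a ∈ b :: t) hnd.1

lemma condB_iff (s : List Char) (k : Nat) (hk : 0 < k) (hkn : k ≤ s.length) :
    (PySem.Int.mod (s.length : Int) (k : Int) == 0 &&
      (PySem.List.slice s (some (k : Int)) none ==
        PySem.List.slice s none (some (-(k : Int))))) = true ↔
    (k ∣ s.length ∧ Periodic s k) := by
  rw [Bool.and_eq_true, beq_iff_eq, beq_iff_eq, PySem.Int.mod_eq_zero_iff_dvd,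
    Int.natCast_dvd_natCast, PySem.List.slice_from_natCast,
    PySem.List.slice_to_neg_natCast s k hk, drop_eq_take_iff s k hkn]

lemma condA_iff (s : List Char) (k : Nat) (hk2 : 2 ≤ k) (hdvd : k ∣ s.length)
    (hlt : k < s.length) :
    ((PySem.List.pyRange 1 (PySem.Int.floordiv (s.length : Int) (k : Int)) 1).all (fun i =>
        PySem.List.slice s (some 0) (some (k : Int)) ==
        PySem.List.slice s (some ((k : Int) * i)) (some ((k : Int) * (i + 1))))) = true ↔
    Periodic s k := by
  rw [period_iff_blocks s k (by omega) hdvd hlt, List.all_eq_true]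
  constructor
  · intro h i hi1 hi2
    have hmem : ((i : Int)) ∈ PySem.List.pyRange 1 (PySem.Int.floordiv (s.length : Int) (k : Int)) 1 := by
      rw [PySem.List.mem_pyRange_one, PySem.Int.floordiv_natCast]
      constructor <;> omega
    have := h _ hmem
    rw [beq_iff_eq] at this
    have e1 : PySem.List.slice s (some 0) (some (k : Int)) = s.take k := by
      rw [PySem.List.slice_zero_start, PySem.List.slice_to_natCast]
    have e2 : PySem.List.slice s (some ((k : Int) * (i : Int))) (some ((k : Int) * ((i : Int) + 1)))
        = (s.drop (k * i)).take k := by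
      have c1 : (k : Int) * (i : Int) = ((k * i : Nat) : Int) := by push_cast; ring
      have c2 : (k : Int) * ((i : Int) + 1) = ((k * i : Nat) : Int) + ((k : Nat) : Int) := by
        push_cast; ring
      rw [c1, c2, PySem.List.slice_natCast_add]
    rw [e1, e2] at this
    exact this.symm
  · intro h i hmem
    rw [PySem.List.mem_pyRange_one, PySem.Int.floordiv_natCast] at hmem
    obtain ⟨hi1, hi2⟩ := hmem
    obtain ⟨j, rfl⟩ : ∃ j : Nat, i = (j : Int) := ⟨i.toNat, by omega⟩
    have hj1 : 1 ≤ j := by omega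
    have hj2 : j < s.length / k := by omega
    have := h j hj1 hj2
    rw [beq_iff_eq]
    have e1 : PySem.List.slice s (some 0) (some (k : Int)) = s.take k := by
      rw [PySem.List.slice_zero_start, PySem.List.slice_to_natCast]
    have e2 : PySem.List.slice s (some ((k : Int) * (j : Int))) (some ((k : Int) * ((j : Int) + 1)))
        = (s.drop (k * j)).take k := by
      have c1 : (k : Int) * (j : Int) = ((k * j : Nat) : Int) := by push_cast; ring
      have c2 : (k : Int) * ((j : Int) + 1) = ((k * j : Nat) : Int) + ((k : Nat) : Int) := by
        push_cast; ring
      rw [c1, c2, PySem.List.slice_natCast_add]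
    rw [e1, e2, this]

lemma main_any (s : List Char) (h3 : 3 ≤ s.length) :
    (((PySem.Set.ofList s).length == 1) ||
      (PySem.List.pyRange 2 (PySem.Int.floordiv ((s.length : Int) + 1) 2 + 1) 1).any (fun d =>
        PySem.Int.mod (s.length : Int) d == 0 &&
        (PySem.List.pyRange 1 (PySem.Int.floordiv (s.length : Int) d) 1).all (fun i =>
          PySem.List.slice s (some 0) (some d) ==
          PySem.List.slice s (some (d * i)) (some (d * (i + 1)))))) =
    ((PySem.List.pyRange 1 (s.length : Int) 1).any (fun d =>
      PySem.Int.mod (s.length : Int) d == 0 &&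
      PySem.List.slice s (some d) none == PySem.List.slice s none (some (-d)))) := by
  have hne : s ≠ [] := by intro h; rw [h] at h3; simp at h3
  have hfd : PySem.Int.floordiv ((s.length : Int) + 1) 2 = (((s.length + 1) / 2 : Nat) : Int) := by
    have : ((s.length : Int) + 1) = (((s.length + 1 : Nat)) : Int) := by push_cast; ring
    rw [this]
    exact_mod_cast PySem.Int.floordiv_natCast (s.length + 1) 2
  rw [Bool.eq_iff_iff, Bool.or_eq_true, List.any_eq_true, List.any_eq_true]
  constructor
  · rintro (hset | ⟨d, hd, hc⟩)
    · -- all characters equal: period 1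
      rw [Nat.beq_eq_true_eq] at hset
      have hp := (setcheck_iff s hne).mp hset
      refine ⟨1, ?_, ?_⟩
      · rw [PySem.List.mem_pyRange_one]; omega
      · have := (condB_iff s 1 (by omega) (by omega)).mpr ⟨Nat.one_dvd _, hp⟩
        simpa using this
    · rw [PySem.List.mem_pyRange_one, hfd] at hd
      obtain ⟨k, rfl⟩ : ∃ k : Nat, d = (k : Int) := ⟨d.toNat, by omega⟩
      have hk2 : 2 ≤ k := by omega
      have hkle : k ≤ (s.length + 1) / 2 := by omega
      have hklt : k < s.length := by omega
      rw [Bool.and_eq_true] at hc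
      have hdvd : k ∣ s.length := by
        have := hc.1
        rw [beq_iff_eq, PySem.Int.mod_eq_zero_iff_dvd, Int.natCast_dvd_natCast] at this
        exact this
      have hp := (condA_iff s k hk2 hdvd hklt).mp hc.2
      refine ⟨(k : Int), ?_, ?_⟩
      · rw [PySem.List.mem_pyRange_one]; omega
      · exact (condB_iff s k (by omega) (by omega)).mpr ⟨hdvd, hp⟩
  · rintro ⟨d, hd, hc⟩
    rw [PySem.List.mem_pyRange_one] at hd
    obtain ⟨k, rfl⟩ : ∃ k : Nat, d = (k : Int) := ⟨d.toNat, by omega⟩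
    have hk1 : 1 ≤ k := by omega
    have hklt : k < s.length := by omega
    obtain ⟨hdvd, hp⟩ := (condB_iff s k (by omega) (by omega)).mp hc
    by_cases hk : k = 1
    · left
      rw [Nat.beq_eq_true_eq]
      subst hk
      exact (setcheck_iff s hne).mpr hp
    · right
      have hk2 : 2 ≤ k := by omega
      have hdvd2 := hdvd
      obtain ⟨m, hm⟩ := hdvd2
      have hm2 : 2 ≤ m := by nlinarith [Nat.lt_irrefl (k * 1)]
      have h2k : 2 * k ≤ s.length := by
        have : k * 2 ≤ k * m := Nat.mul_le_mul_left k hm2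
        omega
      refine ⟨(k : Int), ?_, ?_⟩
      · rw [PySem.List.mem_pyRange_one, hfd]
        constructor
        · omega
        · have : k ≤ (s.length + 1) / 2 := by omega
          omega
      · rw [Bool.and_eq_true]
        refine ⟨?_, (condA_iff s k hk2 hdvd hklt).mpr hp⟩
        rw [beq_iff_eq, PySem.Int.mod_eq_zero_iff_dvd, Int.natCast_dvd_natCast]
        exact hdvd

lemma if_or_shape (p q : Bool) :
    (if p then false else if q then false else true) = !(p || q) := by
  cases p <;> cases q <;> rfl

lemma core_eq (s : List Char) : aCore s = bCore s := by
  by_cases h3 : 3 ≤ s.length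
  · simp only [aCore, bCore]
    have c1 : (((s.length : Int)) == 1) = false := by rw [beq_eq_false_iff_ne]; omega
    have c2 : (((s.length : Int)) == 2) = false := by rw [beq_eq_false_iff_ne]; omega
    rw [c1, c2]
    simp only [Bool.false_eq_true, if_false]
    rw [← main_any s h3]
    exact if_or_shape _ _
  · have h012 : s.length = 0 ∨ s.length = 1 ∨ s.length = 2 := by omega
    rcases h012 with h | h | h
    · rw [List.length_eq_zero_iff] at h
      subst h
      decide
    · obtain ⟨a, rfl⟩ := List.length_eq_one_iff.mp h
      simp [aCore, bCore]
    · obtain ⟨a, b, rfl⟩ := List.length_eq_two.mp h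
      have er : PySem.List.pyRange 1 (([a, b].length : Int)) 1 = [1] := by
        norm_num
        decide
      have em : PySem.Int.mod (([a, b].length : Int)) 1 = 0 := by norm_num
      have g0 : PySem.List.pyGet? [a, b] 0 = some a := rfl
      have g1 : PySem.List.pyGet? [a, b] 1 = some b := rfl
      have c1 : ((([a, b].length : Int)) == 1) = false := by norm_num
      have c2 : ((([a, b].length : Int)) == 2) = true := by norm_num
      simp only [aCore, bCore, er, List.any_cons, List.any_nil, em, g0, g1, c1, c2,
        Bool.false_eq_true, if_false, if_true,
        PySem.List.slice_from_one, PySem.List.slice_to_neg_one]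
      by_cases hab : a = b
      · subst hab
        simp
      · simp [hab, Ne.symm hab]

-- ===== VERDICT (by name: the statement is the Claim_ definition above) =====
theorem is_valid2_spec : Claim_equal_is_valid2 := by
  intro num _
  show is_valid2 num = is_valid2_alt num
  exact core_eq (PySem.Int.toChars num)
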